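-- pv_equiv track=rewrite | github.com/vic02505/tda_anual_TP | part_I/main_part_I.py | coins_game_v2
-- ===== SOURCE A (Python) =====
-- def coins_game_v2(coins_list):
--     sophia_coins = []
--     mateo_coins = []
--
--
--     sophia_is_playing = True
--     while len(coins_list) > 0:
--         if sophia_is_playing:
--             # Tomo la moneda de mayor valor. De ser iguales tomo la del principio.
--             if coins_list[0] > coins_list[-1]:
--                 selected_coin = coins_list.pop(0)
--             else:
--                 selected_coin = coins_list.pop()
--
--             sophia_coins.append(selected_coin)
--             sophia_is_playing = False
--         else:
--             # Tomo la moneda de menor valor. De ser iguales tomo la del principio.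
--             if coins_list[0] > coins_list[-1]:
--                 selected_coin = coins_list.pop()
--             else:
--                 selected_coin = coins_list.pop(0)
--
--             mateo_coins.append(selected_coin)
--             sophia_is_playing = True
--
--     return (sophia_coins, mateo_coins)
-- ===== SOURCE B (Python) =====
-- def coins_game_v2(coins_list):
--     # Two-pointer scan: O(n) instead of repeated pop(0). Does not mutate the
--     # argument (A empties it); equivalence is about the return value.
--     sophia_coins = []
--     mateo_coins = []
--     l, r = 0, len(coins_list) - 1
--     sophia_is_playing = True
--     while l <= r:
--         front, back = coins_list[l], coins_list[r]
--         if sophia_is_playing: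
--             if front > back:
--                 sophia_coins.append(front)
--                 l += 1
--             else:
--                 sophia_coins.append(back)
--                 r -= 1
--         else:
--             if front > back:
--                 mateo_coins.append(back)
--                 r -= 1
--             else:
--                 mateo_coins.append(front)
--                 l += 1
--         sophia_is_playing = not sophia_is_playing
--     return (sophia_coins, mateo_coins)
-- ===== Notes on version B (the rewrite author's own statement) =====
-- stated objective: faster
-- what changed: Replaces the destructive while-loop with pop(0)/pop() (each pop(0) shifts the whole list) by a non-mutating two-pointer left/right index scan.
import Mathlib
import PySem

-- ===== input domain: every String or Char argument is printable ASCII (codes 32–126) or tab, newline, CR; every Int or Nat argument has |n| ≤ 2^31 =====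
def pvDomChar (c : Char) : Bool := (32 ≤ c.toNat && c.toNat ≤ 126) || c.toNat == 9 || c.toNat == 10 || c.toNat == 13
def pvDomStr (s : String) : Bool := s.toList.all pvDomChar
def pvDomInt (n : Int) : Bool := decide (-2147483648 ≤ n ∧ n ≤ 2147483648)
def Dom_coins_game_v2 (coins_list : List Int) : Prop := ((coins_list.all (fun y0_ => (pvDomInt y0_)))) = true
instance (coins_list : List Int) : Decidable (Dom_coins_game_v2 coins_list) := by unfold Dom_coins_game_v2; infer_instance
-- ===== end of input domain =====

-- B replaces A's destructive pop(0)/pop() loop (quadratic) by a non-mutating two-pointer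
-- index scan (linear). A empties its argument list in place, B does not mutate it;
-- the equivalence proved here is about the return value.

-- ===== PORT A =====
-- A's while-loop as structural recursion on the shrinking list:
-- pop(0) = take the head, pop() = take the last element / dropLast.
def coinsGameA : List Int → Bool → List Int → List Int → List Int × List Int
  | [], _, s, m => (s, m)
  | c :: cs, soph, s, m =>
    let back := (c :: cs).getLast (List.cons_ne_nil c cs)
    if soph then
      if c > back then coinsGameA cs false (s ++ [c]) m
      else coinsGameA (c :: cs).dropLast false (s ++ [back]) m
    else
      if c > back then coinsGameA (c :: cs).dropLast true s (m ++ [back])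
      else coinsGameA cs true s (m ++ [c])
termination_by coins _ _ _ => coins.length
decreasing_by all_goals simp [List.length_dropLast]

def coins_game_v2 (coins_list : List Int) : List Int × List Int :=
  coinsGameA coins_list true [] []

-- ===== PORT B =====
-- B's two-pointer while-loop; the indices are always in range when l ≤ r
-- (they start at 0 and len-1), so the .getD 0 default is never used.
def coinsGameB (coins : List Int) (l r : Int) (soph : Bool) (s m : List Int) : List Int × List Int :=
  if l ≤ r then
    let front := (PySem.List.pyGet? coins l).getD 0
    let back := (PySem.List.pyGet? coins r).getD 0
    if soph then
      if front > back then coinsGameB coins (l + 1) r false (s ++ [front]) m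
      else coinsGameB coins l (r - 1) false (s ++ [back]) m
    else
      if front > back then coinsGameB coins l (r - 1) true s (m ++ [back])
      else coinsGameB coins (l + 1) r true s (m ++ [front])
  else (s, m)
termination_by (r + 1 - l).toNat
decreasing_by all_goals omega

def coins_game_v2_alt (coins_list : List Int) : List Int × List Int :=
  coinsGameB coins_list 0 ((coins_list.length : Int) - 1) true [] []

-- ===== PRECONDITION & SPEC =====
def Spec_coins_game_v2 (coins_list : List Int) (out : List Int × List Int) : Prop := out = coins_game_v2_alt coins_list
instance (coins_list : List Int) (out : List Int × List Int) : Decidable (Spec_coins_game_v2 coins_list out) := by unfold Spec_coins_game_v2; infer_instance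

-- ===== CLAIM (what is proved, stated in full; the proofs are below) =====
def Claim_equal_coins_game_v2 : Prop := ∀ (coins_list : List Int), Dom_coins_game_v2 coins_list → Spec_coins_game_v2 coins_list (coins_game_v2 coins_list)

-- ===== LEMMAS AND PROOFS =====

-- Invariant: A on the sub-list coins[li .. li+n) equals B on coins with pointers li, li+n-1.
lemma coinsGame_key (coins : List Int) :
    ∀ (n li : Nat), li + n ≤ coins.length →
    ∀ soph s m, coinsGameA ((coins.drop li).take n) soph s m
      = coinsGameB coins (li : Int) ((li : Int) + (n : Int) - 1) soph s m := by
  intro n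
  induction n with
  | zero =>
    intro li _ soph s m
    rw [coinsGameB]
    simp [coinsGameA]
  | succ n ih =>
    intro li h soph s m
    have hlt : li < coins.length := by omega
    have hdrop : coins.drop li = coins[li] :: coins.drop (li + 1) :=
      List.drop_eq_getElem_cons hlt
    have hsub : (coins.drop li).take (n + 1)
        = coins[li] :: (coins.drop (li + 1)).take n := by
      rw [hdrop]; rfl
    have hlen : ((coins.drop li).take (n + 1)).length = n + 1 := by
      simp; omega
    have hback : ∀ hne, ((coins.drop li).take (n + 1)).getLast hne = coins[li + n]'(by omega) := by
      intro hne
      rw [List.getLast_eq_getElem]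
      simp only [hlen]
      rw [List.getElem_take, List.getElem_drop]
      congr 1
    have hdl : ((coins.drop li).take (n + 1)).dropLast = (coins.drop li).take n := by
      rw [List.dropLast_eq_take, hlen, List.take_take]
      simp
    have hfrontB : (PySem.List.pyGet? coins (li : Int)).getD 0 = coins[li] := by
      simp [PySem.List.pyGet?_natCast, List.getElem?_eq_getElem hlt]
    have hr : ((li : Int) + ((n : Nat) + 1 : Nat) - 1) = ((li + n : Nat) : Int) := by
      push_cast; ring
    have hbackB : (PySem.List.pyGet? coins ((li : Int) + ((n : Nat) + 1 : Nat) - 1)).getD 0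
        = coins[li + n]'(by omega) := by
      rw [hr]
      simp only [PySem.List.pyGet?_natCast,
        List.getElem?_eq_getElem (show li + n < coins.length by omega), Option.getD_some]
    have hcast1 : ((li : Int) + ((n : Nat) + 1 : Nat) - 1) = (((li + 1 : Nat) : Int) + (n : Int) - 1) := by
      push_cast; ring
    have hcast2 : ((li : Int) + 1) = (((li + 1 : Nat)) : Int) := by push_cast; ring
    have hcast3 : ((li : Int) + ((n : Nat) + 1 : Nat) - 1 - 1) = ((li : Int) + (n : Int) - 1) := by
      push_cast; ring
    rw [coinsGameB, if_pos (by push_cast; omega)]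
    rw [hsub, coinsGameA]
    simp only [← hsub, hback, hfrontB, hbackB, hdl]
    split_ifs with h1 h2 h2
    · rw [hcast1, hcast2]
      exact ih (li + 1) (by omega) false (s ++ [coins[li]]) m
    · rw [hcast3]
      exact ih li (by omega) false (s ++ [coins[li + n]'(by omega)]) m
    · rw [hcast3]
      exact ih li (by omega) true s (m ++ [coins[li + n]'(by omega)])
    · rw [hcast1, hcast2]
      exact ih (li + 1) (by omega) true s (m ++ [coins[li]])
-- ===== VERDICT (by name: the statement is the Claim_ definition above) =====
theorem coins_game_v2_spec : Claim_equal_coins_game_v2 := by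
  intro coins _
  unfold Spec_coins_game_v2 coins_game_v2 coins_game_v2_alt
  have h := coinsGame_key coins coins.length 0 (by omega) true [] []
  simpa using h
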